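-- pv_equiv track=rewrite | github.com/cwhit151/shopping-concierge-mvp | app.py | detect_fitness_intent
-- ===== SOURCE A (Python) =====
-- def detect_fitness_intent(query: str) -> bool:
--     """Detect if the user query is fitness/running-related."""
--     query_lower = query.lower()
--     fitness_keywords = [
--         "runner", "running", "jogging", "marathon", "workout", "workouts",
--         "fitness", "exercise", "exercising", "training", "cardio",
--         "outdoor", "outdoors", "trail", "gym", "yoga", "pilates",
--         "athletic", "sport", "sports", "athlete", "athletes"
--     ]
--     return any(keyword in query_lower for keyword in fitness_keywords)
-- ===== SOURCE B (Python) =====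
-- def detect_fitness_intent(query: str) -> bool:
--     """Detect if the user query is fitness/running-related."""
--     q = query.lower()
--     keywords = (
--         "runner", "running", "jogging", "marathon", "workout", "workouts",
--         "fitness", "exercise", "exercising", "training", "cardio",
--         "outdoor", "outdoors", "trail", "gym", "yoga", "pilates",
--         "athletic", "sport", "sports", "athlete", "athletes"
--     )
--     # single left-to-right scan over positions: at each position test whether
--     # some keyword starts there (no per-keyword full substring search)
--     for i in range(len(q)):
--         if any(q.startswith(kw, i) for kw in keywords):
--             return True
--     return False
-- ===== Notes on version B (the rewrite author's own statement) =====
-- stated objective: alternative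
-- what changed: A loops over the keywords doing one full substring-containment search per keyword; B does a single left-to-right scan over the positions of the lowered query, testing at each position whether any keyword starts there, returning at the first matching position.
import Mathlib
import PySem

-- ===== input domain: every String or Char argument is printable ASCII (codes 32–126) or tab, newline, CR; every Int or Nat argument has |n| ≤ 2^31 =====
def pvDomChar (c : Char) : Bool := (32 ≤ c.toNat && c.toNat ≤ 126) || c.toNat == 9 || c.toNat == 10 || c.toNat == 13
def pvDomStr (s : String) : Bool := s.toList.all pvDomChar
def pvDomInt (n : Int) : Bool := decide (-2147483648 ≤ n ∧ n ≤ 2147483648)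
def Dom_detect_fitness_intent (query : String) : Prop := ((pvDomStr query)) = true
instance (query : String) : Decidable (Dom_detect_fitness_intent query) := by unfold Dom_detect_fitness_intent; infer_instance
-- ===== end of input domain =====

-- B replaces A's per-keyword substring searches by one left-to-right positional scan
-- (at each position: does some keyword start here?); objective: alternative, same cost.

-- ===== PORT A =====
def pvAKeywords : List String :=
  ["runner", "running", "jogging", "marathon", "workout", "workouts",
   "fitness", "exercise", "exercising", "training", "cardio",
   "outdoor", "outdoors", "trail", "gym", "yoga", "pilates",
   "athletic", "sport", "sports", "athlete", "athletes"]

def detect_fitness_intent (query : String) : Bool :=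
  let query_lower := PySem.Str.lower query
  pvAKeywords.any (fun keyword => PySem.Str.isIn keyword query_lower)

-- ===== PORT B =====
def pvBKeywords : List (List Char) :=
  ["runner".toList, "running".toList, "jogging".toList, "marathon".toList,
   "workout".toList, "workouts".toList, "fitness".toList, "exercise".toList,
   "exercising".toList, "training".toList, "cardio".toList,
   "outdoor".toList, "outdoors".toList, "trail".toList, "gym".toList,
   "yoga".toList, "pilates".toList, "athletic".toList,
   "sport".toList, "sports".toList, "athlete".toList, "athletes".toList]

-- Source B's loop 'for i in range(len(q)): if any(q.startswith(kw, i) ...)': recursion over the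
-- successive suffixes q.drop i; Python's q.startswith(kw, i) (0 ≤ i ≤ len q) is exactly
-- startswith on the suffix, ported with PySem.Chars.startswith.
def pvFitScan : List Char → Bool
  | [] => false
  | c :: rest =>
    if pvBKeywords.any (fun kw => PySem.Chars.startswith (c :: rest) kw) then true
    else pvFitScan rest

def detect_fitness_intent_alt (query : String) : Bool :=
  pvFitScan (PySem.Str.lower query).toList

-- ===== PRECONDITION & SPEC =====
def Spec_detect_fitness_intent (query : String) (out : Bool) : Prop := out = detect_fitness_intent_alt query
instance (query : String) (out : Bool) : Decidable (Spec_detect_fitness_intent query out) := by unfold Spec_detect_fitness_intent; infer_instance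

-- ===== CLAIM (what is proved, stated in full; the proofs are below) =====
def Claim_equal_detect_fitness_intent : Prop := ∀ (query : String), Dom_detect_fitness_intent query → Spec_detect_fitness_intent query (detect_fitness_intent query)

-- ===== LEMMAS AND PROOFS =====

theorem pvFitScan_eq_any_isIn (q : List Char) :
    pvFitScan q = pvBKeywords.any (fun kw => PySem.Chars.isIn kw q) := by
  induction q with
  | nil => decide
  | cons c rest ih =>
    by_cases h : pvBKeywords.any (fun kw => PySem.Chars.startswith (c :: rest) kw) = true
    · obtain ⟨kw, hmem, hsw⟩ := List.any_eq_true.mp h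
      have : pvBKeywords.any (fun kw => PySem.Chars.isIn kw (c :: rest)) = true :=
        List.any_eq_true.mpr ⟨kw, hmem, by
          rw [PySem.Chars.isIn_iff_infix]
          exact ((PySem.Chars.startswith_iff _ _).mp hsw).isInfix⟩
      simp [pvFitScan, h, this]
    · have h' : pvBKeywords.any (fun kw => PySem.Chars.startswith (c :: rest) kw) = false :=
        Bool.eq_false_iff.mpr h
      simp only [pvFitScan, h', if_false, ih, Bool.false_eq_true]
      apply Bool.eq_iff_iff.mpr
      simp only [List.any_eq_true]
      constructor
      · rintro ⟨kw, hmem, hin⟩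
        exact ⟨kw, hmem, by
          rw [PySem.Chars.isIn_iff_infix] at hin ⊢
          exact hin.trans (List.suffix_cons c rest).isInfix⟩
      · rintro ⟨kw, hmem, hin⟩
        rw [PySem.Chars.isIn_iff_infix] at hin
        rcases List.infix_cons_iff.mp hin with hp | hi
        · exfalso
          have hf := List.any_eq_false.mp h' kw hmem
          exact hf ((PySem.Chars.startswith_iff _ _).mpr hp)
        · exact ⟨kw, hmem, (PySem.Chars.isIn_iff_infix _ _).mpr hi⟩

-- ===== VERDICT (by name: the statement is the Claim_ definition above) =====
theorem detect_fitness_intent_spec : Claim_equal_detect_fitness_intent := by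
  intro query _
  unfold Spec_detect_fitness_intent detect_fitness_intent detect_fitness_intent_alt
  rw [pvFitScan_eq_any_isIn]
  simp [pvAKeywords, pvBKeywords]
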